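-- pv_equiv track=rewrite | github.com/dcrespo3d/BeanBrosRemake | next/scripts/convert_layer2.py | extract_palette_for_rgb333_images
-- ===== SOURCE A (Python) =====
-- def extract_palette_for_rgb333_images(rgb333imgs):
--     palset = set()
--     for rgb333img in rgb333imgs:
--         for rgb333 in rgb333img:
--             palset.add(rgb333)
--     palarr = list(palset)
--     palarr.sort()
--     return palarr
-- ===== SOURCE B (Python) =====
-- def extract_palette_for_rgb333_images(rgb333imgs):
--     flat = []
--     for img in rgb333imgs:
--         flat.extend(img)
--     flat.sort()
--     out = []
--     for v in flat:
--         if not out or out[-1] != v: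
--             out.append(v)
--     return out
-- ===== Notes on version B (the rewrite author's own statement) =====
-- stated objective: alternative
-- what changed: Replaces the hash set + sort of the unique values by flatten-all (keeping duplicates), one sort of the whole flat list, and a single linear pass that drops adjacent duplicates; no set is maintained.
import Mathlib
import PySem

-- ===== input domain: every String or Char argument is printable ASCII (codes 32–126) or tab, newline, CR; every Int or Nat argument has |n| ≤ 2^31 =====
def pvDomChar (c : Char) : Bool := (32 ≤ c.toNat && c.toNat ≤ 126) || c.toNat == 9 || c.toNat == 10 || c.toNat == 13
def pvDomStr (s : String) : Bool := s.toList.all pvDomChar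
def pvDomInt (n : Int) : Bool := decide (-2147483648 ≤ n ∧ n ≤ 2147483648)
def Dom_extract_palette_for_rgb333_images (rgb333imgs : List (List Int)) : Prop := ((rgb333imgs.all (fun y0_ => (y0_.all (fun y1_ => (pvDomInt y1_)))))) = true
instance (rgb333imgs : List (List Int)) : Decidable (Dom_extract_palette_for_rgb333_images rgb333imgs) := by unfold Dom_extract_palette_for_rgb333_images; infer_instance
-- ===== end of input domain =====

-- B flattens everything (with duplicates), sorts once, and removes adjacent duplicates
-- in one linear pass — no set is maintained; same O(n log n) cost, different algorithm.

-- ===== PORT A =====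
-- palset = set(); for img: for v: palset.add(v); return sorted(list(palset))
def extract_palette_for_rgb333_images (rgb333imgs : List (List Int)) : List Int :=
  let palset : PySem.Set Int :=
    rgb333imgs.foldl (fun s img => img.foldl (fun s v => PySem.Set.add s v) s) PySem.Set.empty
  PySem.List.sorted palset (fun x => x) false

-- ===== PORT B =====
-- flat = all values (duplicates kept); flat.sort(); adjacent-duplicate elimination pass.
def extract_palette_for_rgb333_images_alt (rgb333imgs : List (List Int)) : List Int :=
  let flat : List Int := rgb333imgs.foldl (fun acc img => acc ++ img) []
  let srt : List Int := PySem.List.sorted flat (fun x => x) false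
  srt.foldl (fun out v => if out.getLast? = some v then out else out ++ [v]) []

-- ===== PRECONDITION & SPEC =====
def Spec_extract_palette_for_rgb333_images (rgb333imgs : List (List Int)) (out : List Int) : Prop := out = extract_palette_for_rgb333_images_alt rgb333imgs
instance (rgb333imgs : List (List Int)) (out : List Int) : Decidable (Spec_extract_palette_for_rgb333_images rgb333imgs out) := by unfold Spec_extract_palette_for_rgb333_images; infer_instance

-- ===== CLAIM (what is proved, stated in full; the proofs are below) =====
def Claim_equal_extract_palette_for_rgb333_images : Prop := ∀ (rgb333imgs : List (List Int)), Dom_extract_palette_for_rgb333_images rgb333imgs → Spec_extract_palette_for_rgb333_images rgb333imgs (extract_palette_for_rgb333_images rgb333imgs)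

-- ===== LEMMAS AND PROOFS =====

-- Recursive characterisation of B's adjacent-dedupe loop.
def destutterFrom (o : Option Int) : List Int → List Int
  | [] => []
  | v :: t => if o = some v then destutterFrom o t else v :: destutterFrom (some v) t

theorem foldl_dedupe_eq_destutterFrom (s : List Int) (acc : List Int) :
    s.foldl (fun out v => if out.getLast? = some v then out else out ++ [v]) acc
      = acc ++ destutterFrom acc.getLast? s := by
  induction s generalizing acc with
  | nil => simp [destutterFrom]
  | cons v t ih =>
    simp only [List.foldl_cons, destutterFrom]
    by_cases h : acc.getLast? = some v
    · simp [h, ih]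
    · simp [h, ih (acc ++ [v])]

-- A's nested Set.add folds build set(flatten).
theorem foldl_append_eq_flatten (l : List (List Int)) :
    ∀ (a : List Int), l.foldl (fun acc img => acc ++ img) a = a ++ l.flatten := by
  induction l with
  | nil => simp
  | cons hd tl ih => intro a; simp only [List.foldl_cons, List.flatten_cons]; rw [ih, List.append_assoc]

theorem foldl_add_eq_ofList (l : List (List Int)) (s : List Int) :
    l.foldl (fun s img => img.foldl (fun s v => PySem.Set.add s v) s) s
      = (l.foldl (fun acc img => acc ++ img) []).foldl (fun s v => PySem.Set.add s v) s := by
  rw [foldl_append_eq_flatten, List.nil_append]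
  induction l generalizing s with
  | nil => simp
  | cons img rest ih =>
    simp only [List.foldl_cons, List.flatten_cons]
    rw [ih, List.foldl_append]

-- destutterFrom (some m) on a ≤-sorted list whose elements dominate m:
-- membership is "in s and ≠ m", the result is strictly increasing, and all elements exceed m.
theorem destutterFrom_props (s : List Int) (hs : s.Pairwise (· ≤ ·)) :
    ∀ m : Int, (∀ y ∈ s, m ≤ y) →
      (∀ x, x ∈ destutterFrom (some m) s ↔ (x ∈ s ∧ x ≠ m)) ∧
      (destutterFrom (some m) s).Pairwise (· < ·) ∧
      (∀ x ∈ destutterFrom (some m) s, m < x) := by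
  induction s with
  | nil => intro m _; simp [destutterFrom]
  | cons v t ih =>
    intro m hm
    rw [List.pairwise_cons] at hs
    obtain ⟨hvt, ht⟩ := hs
    by_cases h : m = v
    · subst h
      have hm' : ∀ y ∈ t, m ≤ y := fun y hy => hvt y hy
      obtain ⟨hmem, hpw, hgt⟩ := ih ht m hm'
      refine ⟨?_, ?_, ?_⟩
      · intro x
        simp only [destutterFrom, if_true]
        rw [hmem x]
        constructor
        · rintro ⟨hx, hne⟩; exact ⟨List.mem_cons_of_mem _ hx, hne⟩
        · rintro ⟨hx, hne⟩
          rcases List.mem_cons.mp hx with rfl | hx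
          · exact absurd rfl hne
          · exact ⟨hx, hne⟩
      · simpa [destutterFrom] using hpw
      · simpa [destutterFrom] using hgt
    · -- m ≠ v : keep v, recurse with v
      have hmv : m < v := lt_of_le_of_ne (hm v (List.mem_cons_self)) h
      obtain ⟨hmem, hpw, hgt⟩ := ih ht v hvt
      have hstep : destutterFrom (some m) (v :: t) = v :: destutterFrom (some v) t := by
        simp [destutterFrom, fun hh : m = v => h hh]
      refine ⟨?_, ?_, ?_⟩
      · intro x
        rw [hstep]
        simp only [List.mem_cons]
        constructor
        · rintro (rfl | hx)
          · exact ⟨Or.inl rfl, (ne_of_gt hmv)⟩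
          · obtain ⟨hxt, _⟩ := (hmem x).mp hx
            exact ⟨Or.inr hxt, ne_of_gt (lt_of_lt_of_le hmv (hvt x hxt))⟩
        · rintro ⟨(rfl | hx), hne⟩
          · exact Or.inl rfl
          · by_cases hxv : x = v
            · exact Or.inl hxv
            · exact Or.inr ((hmem x).mpr ⟨hx, hxv⟩)
      · rw [hstep, List.pairwise_cons]
        exact ⟨fun y hy => (hmem y).mp hy |>.1 |> (fun hyt => lt_of_le_of_ne (hvt y hyt) (Ne.symm ((hmem y).mp hy).2)), hpw⟩
      · rw [hstep]
        intro x hx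
        rcases List.mem_cons.mp hx with rfl | hx
        · exact hmv
        · exact lt_trans hmv (hgt x hx)

theorem destutterFrom_none_props (s : List Int) (hs : s.Pairwise (· ≤ ·)) :
    (∀ x, x ∈ destutterFrom none s ↔ x ∈ s) ∧ (destutterFrom none s).Pairwise (· < ·) := by
  cases s with
  | nil => simp [destutterFrom]
  | cons v t =>
    rw [List.pairwise_cons] at hs
    obtain ⟨hvt, ht⟩ := hs
    obtain ⟨hmem, hpw, hgt⟩ := destutterFrom_props t ht v hvt
    have hstep : destutterFrom (none : Option Int) (v :: t) = v :: destutterFrom (some v) t := by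
      simp [destutterFrom]
    refine ⟨?_, ?_⟩
    · intro x
      rw [hstep]
      simp only [List.mem_cons]
      constructor
      · rintro (rfl | hx)
        · exact Or.inl rfl
        · exact Or.inr ((hmem x).mp hx).1
      · rintro (rfl | hx)
        · exact Or.inl rfl
        · by_cases hxv : x = v
          · exact Or.inl hxv
          · exact Or.inr ((hmem x).mpr ⟨hx, hxv⟩)
    · rw [hstep, List.pairwise_cons]
      refine ⟨fun y hy => ?_, hpw⟩
      have hyt := ((hmem y).mp hy).1
      exact lt_of_le_of_ne (hvt y hyt) (Ne.symm ((hmem y).mp hy).2)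

-- ===== VERDICT (by name: the statement is the Claim_ definition above) =====
theorem extract_palette_for_rgb333_images_spec : Claim_equal_extract_palette_for_rgb333_images := by
  intro rgb333imgs _
  unfold Spec_extract_palette_for_rgb333_images
  unfold extract_palette_for_rgb333_images extract_palette_for_rgb333_images_alt
  set flat : List Int := rgb333imgs.foldl (fun acc img => acc ++ img) [] with hflat
  set srt : List Int := PySem.List.sorted flat (fun x => x) false with hsrt
  have hAset : rgb333imgs.foldl (fun s img => img.foldl (fun s v => PySem.Set.add s v) s) PySem.Set.empty
      = PySem.Set.ofList flat := by
    rw [foldl_add_eq_ofList, PySem.Set.ofList_eq_foldl]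
    rfl
  rw [hAset]
  have hBloop := foldl_dedupe_eq_destutterFrom srt []
  simp only [List.nil_append, List.getLast?_nil] at hBloop
  rw [hBloop]
  -- sorted(set(flat)) = destutterFrom none (sorted flat)
  have hsorted : srt.Pairwise (fun a b => (a : Int) ≤ b) := by
    simpa using PySem.List.sorted_pairwise flat (fun x => x)
  obtain ⟨hmem, hpw⟩ := destutterFrom_none_props srt hsorted
  apply PySem.List.sorted_id_eq_of_perm_of_pairwise
  · -- destutterFrom none srt ~ Set.ofList flat
    rw [List.perm_ext_iff_of_nodup (List.Pairwise.imp (fun h => ne_of_lt h) hpw)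
        (PySem.Set.nodup_ofList flat)]
    intro a
    rw [hmem a, PySem.Set.mem_ofList, PySem.List.mem_sorted]
  · exact List.Pairwise.imp (fun h => le_of_lt h) hpw
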